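-- pv_equiv track=rewrite | github.com/dinnerparty718/leetpy | archive/_meta/Seating Arrangements.py | minOverallAwkwardness
-- ===== SOURCE A (Python) =====
-- from collections import deque
--
-- def minOverallAwkwardness(arr):
--     arr.sort()
--
--     q = deque([])
--
--     for i in range(len(arr)):
--         if i % 2 == 0:
--             q.append(arr[i])
--         else:
--             q.appendleft(arr[i])
--
--     diff = abs(q[0] - q[-1])
--
--     for i in range(1, len(arr)):
--         diff = max(diff,  abs(q[i] - q[i-1]))
--
--     return diff
-- ===== SOURCE B (Python) =====
-- def minOverallAwkwardness(arr):
--     arr.sort()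
--     if len(arr) == 1:
--         return 0
--     best = max(abs(arr[1] - arr[0]), abs(arr[-1] - arr[-2]))
--     for i in range(2, len(arr)):
--         best = max(best, abs(arr[i] - arr[i - 2]))
--     return best
-- ===== Notes on version B (the rewrite author's own statement) =====
-- stated objective: simpler
-- what changed: B never builds the zigzag deque: after sorting it reads the answer directly as the max of the junction gap between the two smallest elements, the wrap gap between the two largest, and all stride-2 gaps, in one index loop over the sorted list.
import Mathlib
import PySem

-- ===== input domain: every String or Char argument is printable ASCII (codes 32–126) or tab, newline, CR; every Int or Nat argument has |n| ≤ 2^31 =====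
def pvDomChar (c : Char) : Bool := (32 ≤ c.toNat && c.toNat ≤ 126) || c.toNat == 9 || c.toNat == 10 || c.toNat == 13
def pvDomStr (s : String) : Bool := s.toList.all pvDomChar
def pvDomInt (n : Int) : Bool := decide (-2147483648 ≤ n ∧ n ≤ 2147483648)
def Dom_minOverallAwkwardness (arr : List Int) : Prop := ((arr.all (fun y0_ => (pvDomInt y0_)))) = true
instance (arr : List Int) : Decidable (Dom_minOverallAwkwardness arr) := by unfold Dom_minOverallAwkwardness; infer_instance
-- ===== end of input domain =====

-- B avoids A's zigzag deque: it takes the max of the junction, wrap and stride-2 gaps of the sorted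
-- list directly (objective: simpler; a timing run also measured it faster by a constant factor).
-- Both Pythons sort arr in place; the equivalence is about the return value (the mutation is
-- identical: both sort).

-- ===== PORT A =====
def minOverallAwkwardness (arr : List Int) : Int :=
  let s := PySem.List.sorted arr (fun x => x) false
  let q := (PySem.List.pyRange 0 (s.length : Int) 1).foldl
    (fun q i => if i % 2 == 0 then q ++ [PySem.List.pyGetD s i 0] else PySem.List.pyGetD s i 0 :: q) []
  let diff := |PySem.List.pyGetD q 0 0 - PySem.List.pyGetD q (-1) 0|
  (PySem.List.pyRange 1 (s.length : Int) 1).foldl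
    (fun d i => max d |PySem.List.pyGetD q i 0 - PySem.List.pyGetD q (i - 1) 0|) diff

-- ===== PORT B =====
def minOverallAwkwardness_alt (arr : List Int) : Int :=
  let s := PySem.List.sorted arr (fun x => x) false
  if s.length == 1 then 0
  else
    let best := max |PySem.List.pyGetD s 1 0 - PySem.List.pyGetD s 0 0|
                    |PySem.List.pyGetD s (-1) 0 - PySem.List.pyGetD s (-2) 0|
    (PySem.List.pyRange 2 (s.length : Int) 1).foldl
      (fun b i => max b |PySem.List.pyGetD s i 0 - PySem.List.pyGetD s (i - 2) 0|) best

-- ===== PRECONDITION & SPEC =====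
-- Pre_ excludes only the empty list, on which both A and B raise IndexError.
def Pre_minOverallAwkwardness (arr : List Int) : Prop := arr ≠ []
instance (arr : List Int) : Decidable (Pre_minOverallAwkwardness arr) := by
  unfold Pre_minOverallAwkwardness; infer_instance
def pvWitness_minOverallAwkwardness : List Int := [3, 1, 2]
def Spec_minOverallAwkwardness (arr : List Int) (out : Int) : Prop := out = minOverallAwkwardness_alt arr
instance (arr : List Int) (out : Int) : Decidable (Spec_minOverallAwkwardness arr out) := by
  unfold Spec_minOverallAwkwardness; infer_instance

-- ===== CLAIM (what is proved, stated in full; the proofs are below) =====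
def Claim_equal_minOverallAwkwardness : Prop := ∀ (arr : List Int), Dom_minOverallAwkwardness arr → Pre_minOverallAwkwardness arr → Spec_minOverallAwkwardness arr (minOverallAwkwardness arr)

-- ===== LEMMAS AND PROOFS =====

-- elements of a list at even / odd positions, in order
def pvEvens : List Int → List Int
  | [] => []
  | [a] => [a]
  | a :: _ :: t => a :: pvEvens t

def pvOdds : List Int → List Int
  | [] => []
  | [_] => []
  | _ :: b :: t => b :: pvOdds t

-- absolute differences of adjacent elements
def pvAdj : List Int → List Int
  | a :: b :: t => |b - a| :: pvAdj (b :: t)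
  | _ => []

-- absolute differences at distance 2
def pvGap2 : List Int → List Int
  | a :: b :: c :: t => |c - a| :: pvGap2 (b :: c :: t)
  | _ => []


-- x :: l has l at the odd positions: the two decompositions agree
lemma pvOdds_cons : ∀ (l : List Int) (x : Int), pvOdds (x :: l) = pvEvens l := by
  intro l
  induction l using pvEvens.induct with
  | case1 => intro x; rfl
  | case2 a => intro x; rfl
  | case3 a b t ih =>
      intro x
      show a :: pvOdds (b :: t) = a :: pvEvens t
      rw [ih b]

lemma pvEvens_cons : ∀ (l : List Int) (x : Int), pvEvens (x :: l) = x :: pvOdds l := by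
  intro l x
  cases l with
  | nil => rfl
  | cons a t => show x :: pvEvens t = x :: pvOdds (a :: t); rw [pvOdds_cons]

lemma pvLen_evens_odds : ∀ s : List Int, (pvEvens s).length + (pvOdds s).length = s.length := by
  intro s
  induction s using pvEvens.induct with
  | case1 => rfl
  | case2 a => rfl
  | case3 a b t ih => simp [pvEvens, pvOdds]; omega

lemma pvEvens_odds_snoc : ∀ (s : List Int) (x : Int),
    pvEvens (s ++ [x]) = pvEvens s ++ (if s.length % 2 = 0 then [x] else []) ∧
    pvOdds (s ++ [x]) = pvOdds s ++ (if s.length % 2 = 0 then [] else [x]) := by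
  intro s
  induction s using pvEvens.induct with
  | case1 => intro x; simp [pvEvens, pvOdds]
  | case2 a => intro x; simp [pvEvens, pvOdds]
  | case3 a b t ih =>
      intro x
      have h := ih x
      have hm : (a :: b :: t).length % 2 = t.length % 2 := by simp [List.length_cons]; omega
      constructor
      · show a :: pvEvens (t ++ [x]) = (a :: pvEvens t) ++ _
        rw [h.1, hm]; simp
      · show b :: pvOdds (t ++ [x]) = (b :: pvOdds t) ++ _
        rw [h.2, hm]; simp

-- the deque-building loop of A yields reverse(odd positions) ++ even positions
lemma pvBuildQ_eq : ∀ s : List Int,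
    (PySem.List.pyRange 0 (s.length : Int) 1).foldl
      (fun q i => if i % 2 == 0 then q ++ [PySem.List.pyGetD s i 0] else PySem.List.pyGetD s i 0 :: q) []
    = (pvOdds s).reverse ++ pvEvens s := by
  intro s
  induction s using List.reverseRecOn with
  | nil => simp [PySem.List.pyRange_one_eq_nil, pvOdds, pvEvens]
  | append_singleton t x ih =>
      have hl : (((t ++ [x]).length : Nat) : Int) = (t.length : Int) + 1 := by simp
      rw [hl, PySem.List.pyRange_one_succ_right (by positivity), List.foldl_append]
      have hcong : (PySem.List.pyRange 0 (t.length : Int) 1).foldl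
          (fun q i => if i % 2 == 0 then q ++ [PySem.List.pyGetD (t ++ [x]) i 0]
                      else PySem.List.pyGetD (t ++ [x]) i 0 :: q) []
        = (PySem.List.pyRange 0 (t.length : Int) 1).foldl
          (fun q i => if i % 2 == 0 then q ++ [PySem.List.pyGetD t i 0]
                      else PySem.List.pyGetD t i 0 :: q) [] := by
        apply PySem.List.foldl_congr_mem
        intro acc i hi
        have hmem := (PySem.List.mem_pyRange_one).1 hi
        have hg : PySem.List.pyGetD (t ++ [x]) i 0 = PySem.List.pyGetD t i 0 := by
          rw [PySem.List.pyGetD_eq_getElem (t ++ [x]) 0 (by omega) (by simp; omega),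
              PySem.List.pyGetD_eq_getElem t 0 (by omega) (by exact_mod_cast hmem.2)]
          rw [List.getElem_append_left]
        rw [hg]
      rw [hcong, ih]
      have hx : PySem.List.pyGetD (t ++ [x]) (t.length : Int) 0 = x := by
        rw [PySem.List.pyGetD_eq_getElem (t ++ [x]) 0 (by positivity) (by simp)]
        simp
      have hsnoc := pvEvens_odds_snoc t x
      by_cases hp : t.length % 2 = 0
      · have hb : ((t.length : Int) % 2 == 0) = true := by
          simp only [beq_iff_eq]; omega
        simp only [hb, hsnoc.1, hsnoc.2, if_pos hp]
        simp
        intro hco; exfalso; omega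
      · have hb : ((t.length : Int) % 2 == 0) = false := by
          simp only [beq_eq_false_iff_ne, ne_eq]; omega
        simp only [hb, hsnoc.1, hsnoc.2, if_neg hp]
        simp
        intro hco; exfalso; omega

lemma pvAdj_snoc : ∀ (t : List Int) (x : Int), t ≠ [] →
    pvAdj (t ++ [x]) = pvAdj t ++ [|x - t.getLast?.getD 0|] := by
  intro t
  induction t with
  | nil => intro x h; exact absurd rfl h
  | cons a t' ih =>
      intro x _
      cases t' with
      | nil => simp [pvAdj]
      | cons b t'' =>
          show |b - a| :: pvAdj ((b :: t'') ++ [x]) = _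
          rw [ih x (List.cons_ne_nil _ _), List.getLast?_cons_cons]
          rfl

lemma pvAdj_fold : ∀ (q : List Int) (d : Int),
    (PySem.List.pyRange 1 (q.length : Int) 1).foldl
      (fun d i => max d |PySem.List.pyGetD q i 0 - PySem.List.pyGetD q (i - 1) 0|) d
    = (pvAdj q).foldl max d := by
  intro q
  induction q using List.reverseRecOn with
  | nil => intro d; simp [PySem.List.pyRange_one_eq_nil, pvAdj]
  | append_singleton t x ih =>
      intro d
      cases ht : t with
      | nil => subst ht; simp [PySem.List.pyRange_one_eq_nil, pvAdj]
      | cons a t' =>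
        rw [← ht]
        have htne : t ≠ [] := by rw [ht]; exact List.cons_ne_nil _ _
        have h1 : 1 ≤ t.length := by rw [ht]; simp
        have hl : (((t ++ [x]).length : Nat) : Int) = (t.length : Int) + 1 := by simp
        rw [hl, PySem.List.pyRange_one_succ_right (by exact_mod_cast h1), List.foldl_append]
        have hcong : (PySem.List.pyRange 1 (t.length : Int) 1).foldl
            (fun d i => max d |PySem.List.pyGetD (t ++ [x]) i 0 - PySem.List.pyGetD (t ++ [x]) (i - 1) 0|) d
          = (PySem.List.pyRange 1 (t.length : Int) 1).foldl
            (fun d i => max d |PySem.List.pyGetD t i 0 - PySem.List.pyGetD t (i - 1) 0|) d := by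
          apply PySem.List.foldl_congr_mem
          intro acc i hi
          have hmem := (PySem.List.mem_pyRange_one).1 hi
          have hg1 : PySem.List.pyGetD (t ++ [x]) i 0 = PySem.List.pyGetD t i 0 := by
            rw [PySem.List.pyGetD_eq_getElem (t ++ [x]) 0 (by omega) (by simp; omega),
                PySem.List.pyGetD_eq_getElem t 0 (by omega) (by exact_mod_cast hmem.2)]
            rw [List.getElem_append_left]
          have hg2 : PySem.List.pyGetD (t ++ [x]) (i - 1) 0 = PySem.List.pyGetD t (i - 1) 0 := by
            rw [PySem.List.pyGetD_eq_getElem (t ++ [x]) 0 (by omega) (by simp; omega),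
                PySem.List.pyGetD_eq_getElem t 0 (by omega) (by push_cast; omega)]
            rw [List.getElem_append_left]
          rw [hg1, hg2]
        rw [hcong, ih d]
        have hx : PySem.List.pyGetD (t ++ [x]) (t.length : Int) 0 = x := by
          rw [PySem.List.pyGetD_eq_getElem (t ++ [x]) 0 (by positivity) (by simp)]
          simp
        have hlast : PySem.List.pyGetD (t ++ [x]) ((t.length : Int) - 1) 0 = t.getLast?.getD 0 := by
          rw [PySem.List.pyGetD_eq_getElem (t ++ [x]) 0 (by omega) (by simp)]
          rw [List.getElem_append_left (by omega)]
          rw [List.getLast?_eq_getElem?]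
          rw [List.getElem?_eq_getElem (show t.length - 1 < t.length by omega), Option.getD_some]
          congr 1
          omega
        simp only [List.foldl_cons, List.foldl_nil]
        rw [hx, hlast, pvAdj_snoc t x htne, List.foldl_append]
        rfl

lemma pvGap2_snoc : ∀ (t : List Int) (x : Int), 2 ≤ t.length →
    pvGap2 (t ++ [x]) = pvGap2 t ++ [|x - (t[t.length-2]?).getD 0|] := by
  intro t
  induction t using pvGap2.induct with
  | case1 a b c t'' ih =>
      intro x _
      show |c - a| :: pvGap2 ((b :: c :: t'') ++ [x]) = _
      rw [ih x (by simp)]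
      simp [pvGap2]
      rfl
  | case2 t hno =>
      intro x hlen
      match t, hlen with
      | [a, b], _ => simp [pvGap2]
      | a :: b :: c :: r, _ => exact absurd rfl (fun h => hno a b c r h)

lemma pvGap2_fold : ∀ (s : List Int) (d : Int),
    (PySem.List.pyRange 2 (s.length : Int) 1).foldl
      (fun b i => max b |PySem.List.pyGetD s i 0 - PySem.List.pyGetD s (i - 2) 0|) d
    = (pvGap2 s).foldl max d := by
  intro s
  induction s using List.reverseRecOn with
  | nil => intro d; simp [PySem.List.pyRange_one_eq_nil, pvGap2]
  | append_singleton t x ih =>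
      intro d
      by_cases h2 : 2 ≤ t.length
      · have hl : (((t ++ [x]).length : Nat) : Int) = (t.length : Int) + 1 := by simp
        rw [hl, PySem.List.pyRange_one_succ_right (by exact_mod_cast h2), List.foldl_append]
        have hcong : (PySem.List.pyRange 2 (t.length : Int) 1).foldl
            (fun b i => max b |PySem.List.pyGetD (t ++ [x]) i 0 - PySem.List.pyGetD (t ++ [x]) (i - 2) 0|) d
          = (PySem.List.pyRange 2 (t.length : Int) 1).foldl
            (fun b i => max b |PySem.List.pyGetD t i 0 - PySem.List.pyGetD t (i - 2) 0|) d := by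
          apply PySem.List.foldl_congr_mem
          intro acc i hi
          have hmem := (PySem.List.mem_pyRange_one).1 hi
          have hg1 : PySem.List.pyGetD (t ++ [x]) i 0 = PySem.List.pyGetD t i 0 := by
            rw [PySem.List.pyGetD_eq_getElem (t ++ [x]) 0 (by omega) (by simp; omega),
                PySem.List.pyGetD_eq_getElem t 0 (by omega) (by exact_mod_cast hmem.2)]
            rw [List.getElem_append_left]
          have hg2 : PySem.List.pyGetD (t ++ [x]) (i - 2) 0 = PySem.List.pyGetD t (i - 2) 0 := by
            rw [PySem.List.pyGetD_eq_getElem (t ++ [x]) 0 (by omega) (by simp; omega),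
                PySem.List.pyGetD_eq_getElem t 0 (by omega) (by push_cast; omega)]
            rw [List.getElem_append_left]
          rw [hg1, hg2]
        rw [hcong, ih d]
        have hx : PySem.List.pyGetD (t ++ [x]) (t.length : Int) 0 = x := by
          rw [PySem.List.pyGetD_eq_getElem (t ++ [x]) 0 (by positivity) (by simp)]
          simp
        have hprev : PySem.List.pyGetD (t ++ [x]) ((t.length : Int) - 2) 0 = (t[t.length-2]?).getD 0 := by
          rw [PySem.List.pyGetD_eq_getElem (t ++ [x]) 0 (by omega) (by simp)]
          rw [List.getElem_append_left (by omega)]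
          rw [List.getElem?_eq_getElem (show t.length - 2 < t.length by omega), Option.getD_some]
          congr 1
          omega
        simp only [List.foldl_cons, List.foldl_nil]
        rw [hx, hprev, pvGap2_snoc t x h2, List.foldl_append]
        rfl
      · have hr : PySem.List.pyRange 2 ((t ++ [x]).length : Int) 1 = [] := by
          apply PySem.List.pyRange_one_eq_nil
          simp; omega
        have hg : pvGap2 (t ++ [x]) = [] := by
          rcases t with _ | ⟨a, _ | ⟨b, r⟩⟩
          · rfl
          · rfl
          · exfalso; simp at h2
        rw [hr, hg]
        rfl

lemma pvAdj_reverse : ∀ X : List Int, pvAdj X.reverse = (pvAdj X).reverse := by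
  intro X
  induction X with
  | nil => rfl
  | cons a X' ih =>
      cases X' with
      | nil => rfl
      | cons b t =>
          have hne : (b :: t).reverse ≠ [] := by simp
          rw [List.reverse_cons, pvAdj_snoc _ a hne, ih, List.getLast?_reverse]
          show _ = ((|b - a| :: pvAdj (b :: t)).reverse)
          rw [List.reverse_cons]
          congr 1
          simp [abs_sub_comm]

lemma pvAdj_append : ∀ (X Y : List Int), X ≠ [] → Y ≠ [] →
    pvAdj (X ++ Y) = pvAdj X ++ |Y.head?.getD 0 - X.getLast?.getD 0| :: pvAdj Y := by
  intro X
  induction X with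
  | nil => intro Y h _; exact absurd rfl h
  | cons a X' ih =>
      intro Y _ hY
      cases X' with
      | nil =>
          cases Y with
          | nil => exact absurd rfl hY
          | cons c Y' => rfl
      | cons b t =>
          show |b - a| :: pvAdj ((b :: t) ++ Y) = _
          rw [ih Y (List.cons_ne_nil _ _) hY, List.getLast?_cons_cons]
          rfl

-- the distance-2 gaps of s are exactly the adjacent gaps inside the even and odd halves
lemma pvGap2_perm : ∀ s : List Int, (pvGap2 s).Perm (pvAdj (pvEvens s) ++ pvAdj (pvOdds s)) := by
  intro s
  induction s using pvGap2.induct with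
  | case1 a b c t ih =>
      have he : pvEvens (a :: b :: c :: t) = a :: c :: pvOdds t := by
        show a :: pvEvens (c :: t) = _
        rw [pvEvens_cons]
      have heA : pvAdj (pvEvens (a :: b :: c :: t)) = |c - a| :: pvAdj (pvEvens (c :: t)) := by
        rw [he, pvEvens_cons]
        rfl
      have ho : pvOdds (a :: b :: c :: t) = pvEvens (b :: c :: t) := by
        show b :: pvOdds (c :: t) = _
        rw [pvOdds_cons]
        rfl
      have ho2 : pvOdds (b :: c :: t) = pvEvens (c :: t) := by
        show c :: pvOdds t = _
        rw [pvEvens_cons]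
      have p0 : (pvAdj (pvEvens (b :: c :: t)) ++ pvAdj (pvOdds (b :: c :: t))).Perm
          (pvAdj (pvEvens (c :: t)) ++ pvAdj (pvEvens (b :: c :: t))) := by
        rw [ho2]
        exact List.perm_append_comm
      show (|c - a| :: pvGap2 (b :: c :: t)).Perm _
      rw [heA, ho, List.cons_append]
      exact List.Perm.cons _ (ih.trans p0)
  | case2 t hno =>
      match t with
      | [] => simp [pvGap2, pvEvens, pvOdds, pvAdj]
      | [a] => simp [pvGap2, pvEvens, pvOdds, pvAdj]
      | [a, b] => simp [pvGap2, pvEvens, pvOdds, pvAdj]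
      | a :: b :: c :: r => exact absurd rfl (fun h => hno a b c r h)

-- the two ends of the zigzag are the two largest elements of s
lemma pvLast_pair : ∀ s : List Int, 2 ≤ s.length →
    |(pvOdds s).getLast?.getD 0 - (pvEvens s).getLast?.getD 0| =
    |s.getLast?.getD 0 - (s[s.length-2]?).getD 0| := by
  intro s
  induction s using pvEvens.induct with
  | case1 => intro h; simp at h
  | case2 a => intro h; simp at h
  | case3 a b t ih =>
      intro _
      cases t with
      | nil => rfl
      | cons c t' =>
        cases t' with
        | nil => simp [pvEvens, pvOdds, abs_sub_comm]
        | cons dd t'' =>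
          have hoddt : pvOdds (c :: dd :: t'') = dd :: pvOdds t'' := rfl
          have hevt : pvEvens (c :: dd :: t'') = c :: pvEvens t'' := rfl
          have hOs : pvOdds (a :: b :: c :: dd :: t'') = b :: pvOdds (c :: dd :: t'') := rfl
          have hEs : pvEvens (a :: b :: c :: dd :: t'') = a :: pvEvens (c :: dd :: t'') := rfl
          have hO : (pvOdds (a :: b :: c :: dd :: t'')).getLast? = (pvOdds (c :: dd :: t'')).getLast? := by
            rw [hOs, hoddt, List.getLast?_cons_cons]
          have hE : (pvEvens (a :: b :: c :: dd :: t'')).getLast? = (pvEvens (c :: dd :: t'')).getLast? := by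
            rw [hEs, hevt, List.getLast?_cons_cons]
          have hL : (a :: b :: c :: dd :: t'').getLast? = (c :: dd :: t'').getLast? := by
            rw [List.getLast?_cons_cons, List.getLast?_cons_cons]
          have hI : ((a :: b :: c :: dd :: t'')[(a :: b :: c :: dd :: t'').length - 2]?) =
              ((c :: dd :: t'')[(c :: dd :: t'').length - 2]?) := by
            simp only [List.length_cons]
            rw [show t''.length + 1 + 1 + 1 + 1 - 2 = (t''.length + 1 + 1 - 2) + 1 + 1 by omega]
            rw [List.getElem?_cons_succ, List.getElem?_cons_succ]
          rw [hO, hE, hL, hI]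
          exact ih (by simp)

lemma pvFoldl_max_perm {l₁ l₂ : List Int} (h : l₁.Perm l₂) (d : Int) :
    l₁.foldl max d = l₂.foldl max d :=
  h.foldl_eq' (fun x _ y _ z => max_right_comm z x y) d


-- after pre-substituting A's deque by its characterization, A's scan equals B's formula
lemma pvCore (s : List Int) (hne : s ≠ []) :
    (PySem.List.pyRange 1 (s.length : Int) 1).foldl
      (fun d i => max d |PySem.List.pyGetD ((pvOdds s).reverse ++ pvEvens s) i 0 -
                         PySem.List.pyGetD ((pvOdds s).reverse ++ pvEvens s) (i - 1) 0|)
      |PySem.List.pyGetD ((pvOdds s).reverse ++ pvEvens s) 0 0 -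
       PySem.List.pyGetD ((pvOdds s).reverse ++ pvEvens s) (-1) 0|
    = (if s.length == 1 then 0 else
        (PySem.List.pyRange 2 (s.length : Int) 1).foldl
          (fun b i => max b |PySem.List.pyGetD s i 0 - PySem.List.pyGetD s (i - 2) 0|)
          (max |PySem.List.pyGetD s 1 0 - PySem.List.pyGetD s 0 0|
               |PySem.List.pyGetD s (-1) 0 - PySem.List.pyGetD s (-2) 0|)) := by
  match s, hne with
  | [a], _ =>
      simp [pvOdds, pvEvens, PySem.List.pyRange_one_eq_nil,
            PySem.List.pyGetD_zero_cons, PySem.List.pyGetD_neg_one]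
  | a :: b :: t, _ =>
      set s := a :: b :: t with hs
      have hlen2 : 2 ≤ s.length := by simp [hs]
      have hO : pvOdds s = b :: pvOdds t := rfl
      have hE : pvEvens s = a :: pvOdds (b :: t) := by rw [hs, pvEvens_cons]
      have hOne : pvOdds s ≠ [] := by rw [hO]; exact List.cons_ne_nil _ _
      have hEne : pvEvens s ≠ [] := by rw [hE]; exact List.cons_ne_nil _ _
      have hORne : (pvOdds s).reverse ≠ [] := by simpa using hOne
      have hqne : (pvOdds s).reverse ++ pvEvens s ≠ [] := by
        simp [hEne]
      have hqlen : (((pvOdds s).reverse ++ pvEvens s).length : Int) = (s.length : Int) := by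
        have := pvLen_evens_odds s
        simp only [List.length_append, List.length_reverse]
        omega
      -- the initial value: the wrap gap
      have hw0 : PySem.List.pyGetD ((pvOdds s).reverse ++ pvEvens s) 0 0 =
          (pvOdds s).getLast?.getD 0 := by
        obtain ⟨y, ys, hOR⟩ := List.exists_cons_of_ne_nil hORne
        rw [← List.head?_reverse, hOR, List.cons_append, PySem.List.pyGetD_zero_cons]
        rfl
      have hw1 : PySem.List.pyGetD ((pvOdds s).reverse ++ pvEvens s) (-1) 0 =
          (pvEvens s).getLast?.getD 0 := by
        rw [PySem.List.pyGetD_neg_one _ _ hqne]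
        rw [show ((pvOdds s).reverse ++ pvEvens s).getLast hqne =
            (((pvOdds s).reverse ++ pvEvens s).getLast?.getD 0) by
          rw [List.getLast?_eq_getLast hqne]; rfl]
        rw [List.getLast?_append_of_ne_nil _ hEne]
      have hwrap : |PySem.List.pyGetD ((pvOdds s).reverse ++ pvEvens s) 0 0 -
          PySem.List.pyGetD ((pvOdds s).reverse ++ pvEvens s) (-1) 0| =
          |s.getLast?.getD 0 - (s[s.length - 2]?).getD 0| := by
        rw [hw0, hw1, pvLast_pair s hlen2]
      -- A's scan over adjacent pairs of the zigzag
      have hfoldA : ∀ d : Int, (PySem.List.pyRange 1 (s.length : Int) 1).foldl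
          (fun d i => max d |PySem.List.pyGetD ((pvOdds s).reverse ++ pvEvens s) i 0 -
                             PySem.List.pyGetD ((pvOdds s).reverse ++ pvEvens s) (i - 1) 0|) d
          = (pvAdj ((pvOdds s).reverse ++ pvEvens s)).foldl max d := by
        intro d
        rw [← hqlen, pvAdj_fold]
      -- the multiset of adjacent zigzag gaps is the junction gap plus all stride-2 gaps
      have hperm : (pvAdj ((pvOdds s).reverse ++ pvEvens s)).Perm (|b - a| :: pvGap2 s) := by
        rw [pvAdj_append _ _ hORne hEne, pvAdj_reverse, List.getLast?_reverse]
        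
        have hh1 : (pvEvens s).head?.getD 0 = a := by rw [hE]; rfl
        have hh2 : (pvOdds s).head?.getD 0 = b := by rw [hO]; rfl
        rw [hh1, hh2, show |a - b| = |b - a| from abs_sub_comm a b]
        refine ((List.Perm.append_right _ (List.reverse_perm _)).trans
          List.perm_middle).trans (List.Perm.cons _ ?_)
        exact (List.perm_append_comm).trans (pvGap2_perm s).symm
      rw [hfoldA, hwrap, pvFoldl_max_perm hperm, List.foldl_cons]
      -- B's side
      have hb1 : PySem.List.pyGetD s 1 0 = b := by
        rw [PySem.List.pyGetD_eq_getElem s 0 (by omega) (by simp [hs])]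
        simp [hs]
      have hb0 : PySem.List.pyGetD s 0 0 = a := by rw [hs, PySem.List.pyGetD_zero_cons]
      have hbl : PySem.List.pyGetD s (-1) 0 = s.getLast?.getD 0 := by
        rw [PySem.List.pyGetD_neg_one _ _ (by simp [hs]),
            List.getLast?_eq_getLast (by simp [hs] : s ≠ [])]
        rfl
      have hbp : PySem.List.pyGetD s (-2) 0 = (s[s.length - 2]?).getD 0 := by
        rw [PySem.List.pyGetD_neg_ofNat s 2 0 (by omega) hlen2,
            List.getElem?_eq_getElem (by omega), Option.getD_some]
      have hif : (s.length == 1) = false := by simp [hs]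
      rw [hif, if_neg (by simp), pvGap2_fold, hb1, hb0, hbl, hbp]
      congr 1
      exact max_comm _ _

-- ===== VERDICT (by name: the statement is the Claim_ definition above) =====
theorem minOverallAwkwardness_spec : Claim_equal_minOverallAwkwardness := by
  intro arr _ hpre
  unfold Spec_minOverallAwkwardness
  unfold minOverallAwkwardness minOverallAwkwardness_alt
  simp only []
  have hsne : PySem.List.sorted arr (fun x => x) false ≠ [] := by
    rw [ne_eq, PySem.List.sorted_eq_nil_iff]
    exact hpre
  rw [pvBuildQ_eq]
  exact pvCore _ hsne
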